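-- pv_equiv track=rewrite | github.com/seonhara/ai-co-scientist-data-minimization | experiments/main_results/run_final_expriement.py | columns_matching_prefixes
-- ===== SOURCE A (Python) =====
-- from typing import Dict, Iterable, List, Sequence, Tuple
--
-- def columns_matching_prefixes(columns: Sequence[str], prefixes: Sequence[str]) -> List[str]:
--     """
--     Return a stable (deterministic) list of columns to remove:
--     - exact match if prefix equals a column name
--     - else prefix-match for one-hot encoded columns
--     """
--     col_set = set(columns)
--     to_remove: List[str] = []
--
--     for prefix in prefixes:
--         if prefix in col_set:
--             to_remove.append(prefix)
--         else:
--             to_remove.extend([c for c in columns if c.startswith(prefix)])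
--
--     # unique while preserving order
--     seen = set()
--     deduped = []
--     for c in to_remove:
--         if c not in seen:
--             seen.add(c)
--             deduped.append(c)
--     return deduped
-- ===== SOURCE B (Python) =====
-- from bisect import bisect_left
--
-- def columns_matching_prefixes(columns, prefixes):
--     """Sort the columns once (keeping original positions); each prefix's
--     matches are then a contiguous range found by binary search, restored
--     to original column order by re-sorting the range by position."""
--     pairs = sorted((c, j) for j, c in enumerate(columns))
--     names = [c for c, _ in pairs]
--     seen = set()
--     out = []
--     for p in prefixes:
--         lo = bisect_left(names, p)
--         if lo < len(names) and names[lo] == p: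
--             cands = [p]
--         else:
--             if p:
--                 succ = p[:-1] + chr(ord(p[-1]) + 1)
--                 hi = bisect_left(names, succ)
--             else:
--                 hi = len(names)
--             cands = [c for c, _ in sorted(pairs[lo:hi], key=lambda t: t[1])]
--         for c in cands:
--             if c not in seen:
--                 seen.add(c)
--                 out.append(c)
--     return out
-- ===== Notes on version B (the rewrite author's own statement) =====
-- stated objective: faster
-- what changed: A scans all columns once per prefix (and dedupes in a second pass); B sorts the columns once with their original positions, finds each prefix's matches as a contiguous range of the sorted list via bisect (exact match checked at the range start), and restores original column order by re-sorting the small range by position.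
import Mathlib
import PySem

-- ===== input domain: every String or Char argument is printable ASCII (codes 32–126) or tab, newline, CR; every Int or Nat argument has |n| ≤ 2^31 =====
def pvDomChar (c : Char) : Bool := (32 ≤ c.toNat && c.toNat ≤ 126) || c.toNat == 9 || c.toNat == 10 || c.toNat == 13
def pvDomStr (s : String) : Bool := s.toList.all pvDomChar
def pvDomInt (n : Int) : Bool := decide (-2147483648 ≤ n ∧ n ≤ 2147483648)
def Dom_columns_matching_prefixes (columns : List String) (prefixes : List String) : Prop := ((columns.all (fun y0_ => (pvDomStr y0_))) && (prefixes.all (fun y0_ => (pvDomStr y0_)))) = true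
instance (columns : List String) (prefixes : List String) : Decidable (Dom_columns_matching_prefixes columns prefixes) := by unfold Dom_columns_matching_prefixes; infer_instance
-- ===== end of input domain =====

-- B replaces A's per-prefix scan of all columns by one sort of the columns (keeping
-- original positions) plus a bisect-found contiguous range per prefix, re-sorted by
-- position (objective: faster, measured so in a timing run).

-- ===== PORT A =====
def columns_matching_prefixes (columns : List String) (prefixes : List String) : List String :=
  let col_set : PySem.Set String := PySem.Set.ofList columns
  let to_remove : List String :=
    prefixes.foldl (fun acc pre =>
      if PySem.Set.contains col_set pre then acc ++ [pre]
      else acc ++ columns.filter (fun c => PySem.Str.startswith c pre)) []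
  -- unique while preserving order
  let r : PySem.Set String × List String :=
    to_remove.foldl (fun st c =>
      if PySem.Set.contains st.1 c then st
      else (PySem.Set.add st.1 c, st.2 ++ [c])) (PySem.Set.empty, [])
  r.2

-- ===== PORT B =====
def columns_matching_prefixes_alt (columns : List String) (prefixes : List String) : List String :=
  -- pairs = sorted((c, j) for j, c in enumerate(columns)); Python tuple sort = sorted2 on (fst, snd)
  let pairs : List (String × Int) :=
    PySem.List.sorted2 ((PySem.List.enumerate columns).map (fun q => (q.2, q.1)))
      (fun t => t.1) (fun t => t.2)
  let names : List String := pairs.map (fun t => t.1)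
  let r : PySem.Set String × List String :=
    prefixes.foldl (fun st p =>
      let lo := PySem.List.bisectLeft names p
      let cands : List String :=
        if lo < names.length ∧ names.getD lo "" = p then [p]
        else
          let hi : Nat :=
            if p.toList ≠ [] then
              -- succ = p[:-1] + chr(ord(p[-1]) + 1); exact for the admitted ASCII strings
              PySem.List.bisectLeft names
                (String.ofList (p.toList.dropLast ++ [Char.ofNat (p.toList.getLast!.toNat + 1)]))
            else names.length
          (PySem.List.sorted (PySem.List.slice pairs (some (lo : Int)) (some (hi : Int)))
            (fun t => t.2)).map (fun t => t.1)
      cands.foldl (fun st2 c =>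
        if PySem.Set.contains st2.1 c then st2
        else (PySem.Set.add st2.1 c, st2.2 ++ [c])) st) (PySem.Set.empty, [])
  r.2

-- ===== PRECONDITION & SPEC =====
def Spec_columns_matching_prefixes (columns : List String) (prefixes : List String) (out : List String) : Prop := out = columns_matching_prefixes_alt columns prefixes
instance (columns : List String) (prefixes : List String) (out : List String) : Decidable (Spec_columns_matching_prefixes columns prefixes out) := by unfold Spec_columns_matching_prefixes; infer_instance

-- ===== CLAIM (what is proved, stated in full; the proofs are below) =====
def Claim_equal_columns_matching_prefixes : Prop := ∀ (columns : List String) (prefixes : List String), Dom_columns_matching_prefixes columns prefixes → Spec_columns_matching_prefixes columns prefixes (columns_matching_prefixes columns prefixes)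

-- ===== LEMMAS AND PROOFS =====

-- the shared dedupe step (first occurrence wins): both programs' accumulator loop
def pvDD (st : PySem.Set String × List String) (l : List String) : PySem.Set String × List String :=
  l.foldl (fun st c =>
    if PySem.Set.contains st.1 c then st
    else (PySem.Set.add st.1 c, st.2 ++ [c])) st

-- the candidates a single prefix contributes in A
def pvChunk (columns : List String) (pre : String) : List String :=
  if PySem.Set.contains (PySem.Set.ofList columns) pre then [pre]
  else columns.filter (fun c => PySem.Str.startswith c pre)

-- the candidates a single prefix contributes in B (verbatim the `cands` of the port)
def pvCands (columns : List String) (p : String) : List String :=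
  let pairs : List (String × Int) :=
    PySem.List.sorted2 ((PySem.List.enumerate columns).map (fun q => (q.2, q.1)))
      (fun t => t.1) (fun t => t.2)
  let names : List String := pairs.map (fun t => t.1)
  let lo := PySem.List.bisectLeft names p
  if lo < names.length ∧ names.getD lo "" = p then [p]
  else
    let hi : Nat :=
      if p.toList ≠ [] then
        PySem.List.bisectLeft names
          (String.ofList (p.toList.dropLast ++ [Char.ofNat (p.toList.getLast!.toNat + 1)]))
      else names.length
    (PySem.List.sorted (PySem.List.slice pairs (some (lo : Int)) (some (hi : Int)))
      (fun t => t.2)).map (fun t => t.1)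

lemma pvDD_append (st : PySem.Set String × List String) (l1 l2 : List String) :
    pvDD st (l1 ++ l2) = pvDD (pvDD st l1) l2 := by
  simp [pvDD, List.foldl_append]

-- A's to_remove loop is the flatMap of the chunks
lemma pvA_to_remove (columns prefixes : List String) :
    prefixes.foldl (fun acc pre =>
      if PySem.Set.contains (PySem.Set.ofList columns) pre then acc ++ [pre]
      else acc ++ columns.filter (fun c => PySem.Str.startswith c pre)) []
    = prefixes.flatMap (pvChunk columns) := by
  have h : ∀ (acc : List String),
      prefixes.foldl (fun acc pre =>
        if PySem.Set.contains (PySem.Set.ofList columns) pre then acc ++ [pre]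
        else acc ++ columns.filter (fun c => PySem.Str.startswith c pre)) acc
      = acc ++ prefixes.flatMap (pvChunk columns) := by
    induction prefixes with
    | nil => intro acc; simp
    | cons p t ih =>
      intro acc
      simp only [List.foldl_cons, List.flatMap_cons]
      rw [ih]
      by_cases hp : p ∈ columns
      · simp [pvChunk, hp]
      · simp [pvChunk, hp]
  simpa using h []

lemma pvCharLt (a b : Char) : a < b ↔ a.toNat < b.toNat := by
  rw [Char.lt_def, UInt32.lt_iff_toNat_lt]; rfl
lemma pvCharLe (a b : Char) : a ≤ b ↔ a.toNat ≤ b.toNat := by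
  rw [Char.le_def, UInt32.le_iff_toNat_le]; rfl

lemma pv_sorted2_lex (xs : List (String × Int)) :
    PySem.List.sorted2 xs (fun t => t.1) (fun t => t.2)
    = PySem.List.sorted xs (fun t => toLex t) := by
  rw [PySem.List.sorted_eq_foldl_insertBy]
  unfold PySem.List.sorted2
  simp only [if_neg (by decide : ¬ (false = true))]
  congr 1
  funext acc x
  congr 1
  funext a b
  rcases a with ⟨a1, a2⟩; rcases b with ⟨b1, b2⟩
  simp only [Prod.Lex.lt_iff]
  rcases lt_trichotomy a1 b1 with h | h | h
  · simp [h, lt_asymm h, ne_of_lt h]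
  · simp [h]
  · simp [h, lt_asymm h, ne_of_gt h]

lemma pvBisectLoop_spec {α : Type} [LinearOrder α] (xs : List α) (x : α)
    (hs : List.Pairwise (· ≤ ·) xs) :
    ∀ (fuel lo hi : Nat), lo ≤ hi → hi ≤ xs.length → hi - lo ≤ fuel →
    (∀ j (hj : j < xs.length), j < lo → xs[j] < x) →
    (∀ j (hj : j < xs.length), hi ≤ j → x ≤ xs[j]) →
    PySem.List.bisectLeftLoop xs x fuel lo hi ≤ xs.length ∧
    (∀ j (hj : j < xs.length), j < PySem.List.bisectLeftLoop xs x fuel lo hi → xs[j] < x) ∧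
    (∀ j (hj : j < xs.length), PySem.List.bisectLeftLoop xs x fuel lo hi ≤ j → x ≤ xs[j]) := by
  have hmono : ∀ i j (hi : i < xs.length) (hj : j < xs.length), i ≤ j → xs[i] ≤ xs[j] := by
    intro i j hi hj hij
    rcases eq_or_lt_of_le hij with rfl | h
    · exact le_refl _
    · exact (List.pairwise_iff_getElem.mp hs) i j hi hj h
  intro fuel
  induction fuel with
  | zero =>
    intro lo hi h1 h2 h3 hlow hup
    have : lo = hi := by omega
    subst this
    rw [PySem.List.bisectLeftLoop.eq_def]
    exact ⟨by omega, hlow, hup⟩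
  | succ fuel ih =>
    intro lo hi h1 h2 h3 hlow hup
    rw [PySem.List.bisectLeftLoop.eq_def]
    by_cases hlh : lo < hi
    · simp only [if_pos hlh]
      have hmidlt : (lo + hi) / 2 < xs.length := by omega
      rw [List.getElem?_eq_getElem hmidlt]
      by_cases hy : xs[(lo + hi) / 2] < x
      · simp only [if_pos hy]
        exact ih ((lo + hi) / 2 + 1) hi (by omega) h2 (by omega)
          (fun j hj hjlt => lt_of_le_of_lt (hmono j ((lo+hi)/2) hj hmidlt (by omega)) hy) hup
      · simp only [if_neg hy]
        have hx : x ≤ xs[(lo + hi) / 2] := le_of_not_gt hy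
        exact ih lo ((lo + hi) / 2) (by omega) (by omega) (by omega) hlow
          (fun j hj hjge => le_trans hx (hmono ((lo+hi)/2) j hmidlt hj hjge))
    · simp only [if_neg hlh]
      have : lo = hi := by omega
      subst this
      exact ⟨by omega, hlow, hup⟩

lemma pvBisect_spec {α : Type} [LinearOrder α] (xs : List α) (x : α)
    (hs : List.Pairwise (· ≤ ·) xs) :
    PySem.List.bisectLeft xs x ≤ xs.length ∧
    (∀ j (hj : j < xs.length), j < PySem.List.bisectLeft xs x → xs[j] < x) ∧
    (∀ j (hj : j < xs.length), PySem.List.bisectLeft xs x ≤ j → x ≤ xs[j]) :=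
  pvBisectLoop_spec xs x hs xs.length 0 xs.length (Nat.zero_le _) le_rfl (by omega)
    (fun j hj h => absurd h (by omega)) (fun j hj h => absurd hj (by omega))

lemma pv_prefix_interval (q : List Char) (a : Char) (ha : a.toNat + 1 < 55296) (s : List Char) :
    ((q ++ [a]) ≤ s ∧ s < (q ++ [Char.ofNat (a.toNat + 1)])) ↔ (q ++ [a]) <+: s := by
  have ha' : (Char.ofNat (a.toNat + 1)).toNat = a.toNat + 1 := by
    rw [Char.toNat_ofNat]
    rw [if_pos (Or.inl ha)]
  induction q generalizing s with
  | nil =>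
    cases s with
    | nil =>
      simp only [List.nil_append]
      constructor
      · rintro ⟨hle, -⟩
        exact absurd (lt_of_lt_of_le (List.nil_lt_cons a []) hle) (lt_irrefl _)
      · intro h
        exact absurd (List.IsPrefix.length_le h) (by simp)
    | cons b t =>
      simp only [List.nil_append, List.cons_prefix_cons]
      rw [le_iff_lt_or_eq]
      constructor
      · rintro ⟨hle, hlt⟩
        have hba : b < Char.ofNat (a.toNat + 1) := by
          rcases List.cons_lt_cons_iff.mp hlt with h | ⟨h, h2⟩
          · exact h
          · exact absurd h2 (List.not_lt_nil t)
        have hb : b.toNat ≤ a.toNat := by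
          have := (pvCharLt _ _).mp hba
          omega
        have hab : a ≤ b := by
          rcases hle with h | h
          · rcases List.cons_lt_cons_iff.mp h with h | ⟨h, -⟩
            · exact le_of_lt h
            · exact le_of_eq h
          · cases h; exact le_refl _
        have : a = b := le_antisymm hab (by rw [pvCharLe]; omega)
        exact ⟨this, List.nil_prefix⟩
      · rintro ⟨rfl, -⟩
        refine ⟨?_, ?_⟩
        · rcases t with _ | ⟨u, v⟩
          · right; rfl
          · left; exact List.cons_lt_cons_iff.mpr (Or.inr ⟨rfl, List.nil_lt_cons u v⟩)
        · exact List.cons_lt_cons_iff.mpr (Or.inl (by rw [pvCharLt]; omega))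
  | cons c q' ih =>
    cases s with
    | nil =>
      simp only [List.cons_append]
      constructor
      · rintro ⟨hle, -⟩
        exact absurd (lt_of_lt_of_le (List.nil_lt_cons _ _) hle) (lt_irrefl _)
      · intro h
        exact absurd (List.IsPrefix.length_le h) (by simp)
    | cons b t =>
      simp only [List.cons_append, List.cons_prefix_cons]
      constructor
      · rintro ⟨hle, hlt⟩
        have hcb : c = b := by
          rcases le_iff_lt_or_eq.mp hle with h | h
          · rcases List.cons_lt_cons_iff.mp h with h | ⟨h, -⟩
            · rcases List.cons_lt_cons_iff.mp hlt with h2 | ⟨h2, -⟩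
              · exact absurd h2 (lt_asymm h)
              · exact absurd h2.symm (ne_of_lt h)
            · exact h
          · exact (List.cons.injEq .. ▸ h).1
        subst hcb
        refine ⟨rfl, (ih t).mp ⟨?_, ?_⟩⟩
        · rcases le_iff_lt_or_eq.mp hle with h | h
          · rcases List.cons_lt_cons_iff.mp h with h | ⟨-, h⟩
            · exact absurd h (lt_irrefl _)
            · exact le_of_lt h
          · exact le_of_eq (List.cons.injEq .. ▸ h).2
        · rcases List.cons_lt_cons_iff.mp hlt with h | ⟨-, h⟩
          · exact absurd h (lt_irrefl _)
          · exact h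
      · rintro ⟨rfl, hpre⟩
        have := (ih t).mpr hpre
        refine ⟨?_, ?_⟩
        · rcases le_iff_lt_or_eq.mp this.1 with h | h
          · exact le_of_lt (List.cons_lt_cons_iff.mpr (Or.inr ⟨rfl, h⟩))
          · exact le_of_eq (by rw [h])
        · exact List.cons_lt_cons_iff.mpr (Or.inr ⟨rfl, this.2⟩)

lemma pv_filter_eq_slice {α : Type} (xs : List α) (P : α → Bool) (lo hi : Nat)
    (hlh : lo ≤ hi) (hhi : hi ≤ xs.length)
    (h : ∀ j (hj : j < xs.length), P xs[j] = true ↔ (lo ≤ j ∧ j < hi)) :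
    xs.filter P = (xs.drop lo).take (hi - lo) := by
  have hsplit : xs = xs.take lo ++ ((xs.drop lo).take (hi - lo) ++ xs.drop hi) := by
    have hd : xs.drop hi = (xs.drop lo).drop (hi - lo) := by
      rw [List.drop_drop]; congr 1; omega
    rw [hd, List.take_append_drop, List.take_append_drop]
  conv_lhs => rw [hsplit]
  rw [List.filter_append, List.filter_append]
  have h1 : (xs.take lo).filter P = [] := by
    rw [List.filter_eq_nil_iff]
    intro x hx
    rw [List.mem_take_iff_getElem] at hx
    obtain ⟨i, hlt, he⟩ := hx
    have hi' : i < xs.length := by omega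
    have hxe : xs[i] = x := by simpa using he
    rw [← hxe]
    intro hP
    have := (h i hi').mp hP
    omega
  have h2 : ((xs.drop lo).take (hi - lo)).filter P = (xs.drop lo).take (hi - lo) := by
    rw [List.filter_eq_self]
    intro x hx
    rw [List.mem_take_iff_getElem] at hx
    obtain ⟨i, hlt, he⟩ := hx
    have hlen : (xs.drop lo).length = xs.length - lo := by simp
    have hi' : lo + i < xs.length := by omega
    have hxe : xs[lo + i] = x := by
      have h2 := he
      rw [List.getElem_drop] at h2
      exact h2
    rw [← hxe]
    exact (h (lo + i) hi').mpr (by omega)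
  have h3 : (xs.drop hi).filter P = [] := by
    rw [List.filter_eq_nil_iff]
    intro x hx
    rw [List.mem_drop_iff_getElem] at hx
    obtain ⟨i, hlt, he⟩ := hx
    have hi' : hi + i < xs.length := by omega
    have hxe : xs[hi + i] = x := by simpa using he
    rw [← hxe]
    intro hP
    have := (h (hi + i) hi').mp hP
    omega
  rw [h1, h2, h3]
  simp

lemma pvCands_eq_chunk (columns : List String) (p : String)
    (hp : pvDomStr p = true) :
    pvCands columns p = pvChunk columns p := by
  unfold pvCands pvChunk
  simp only []
  set E : List (String × Int) := (PySem.List.enumerate columns).map (fun q => (q.2, q.1)) with hE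
  rw [pv_sorted2_lex]
  set pairs : List (String × Int) := PySem.List.sorted E (fun t => toLex t) with hpairs
  set names : List String := pairs.map (fun t => t.1) with hnames
  have hperm : pairs.Perm E := PySem.List.sorted_perm E (fun t => toLex t) false
  have hfst : E.map (fun t => t.1) = columns := by
    rw [hE, List.map_map]; exact PySem.List.map_snd_enumerate columns 0
  have hnl : names.length = pairs.length := by rw [hnames]; simp
  have hnj : ∀ j (hj : j < pairs.length), names[j]'(by omega) = pairs[j].1 := by
    intro j hj; simp [hnames]
  have hsorted : names.Pairwise (· ≤ ·) := by
    rw [hnames]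
    rw [List.pairwise_map]
    refine (PySem.List.sorted_pairwise E (fun t => toLex t)).imp ?_
    intro a b hab
    rcases Prod.Lex.le_iff.mp hab with h | ⟨h, -⟩
    · exact le_of_lt h
    · exact le_of_eq h
  have hmem : p ∈ names ↔ p ∈ columns := by
    rw [hnames, ← hfst]
    exact (hperm.map (fun t => t.1)).mem_iff
  obtain ⟨blen, blow, bup⟩ := pvBisect_spec names p hsorted
  set lo := PySem.List.bisectLeft names p with hlo
  have hcond : (lo < names.length ∧ names.getD lo "" = p) ↔ p ∈ columns := by
    constructor
    · rintro ⟨hlt, heq⟩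
      rw [List.getD_eq_getElem _ _ hlt] at heq
      rw [← hmem, ← heq]
      exact List.getElem_mem hlt
    · intro hin
      obtain ⟨k, hk, hke⟩ := List.mem_iff_getElem.mp (hmem.mpr hin)
      have hklo : lo ≤ k := by
        by_contra hcon
        exact absurd hke (ne_of_lt (blow k hk (by omega)))
      have hlolt : lo < names.length := by omega
      have h1 : p ≤ names[lo] := bup lo hlolt le_rfl
      have h2 : names[lo] ≤ names[k] := by
        rcases eq_or_lt_of_le hklo with rfl | h
        · exact le_refl _
        · exact (List.pairwise_iff_getElem.mp hsorted) lo k hlolt hk h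
      exact ⟨hlolt, by rw [List.getD_eq_getElem _ _ hlolt]; exact le_antisymm (hke ▸ h2) h1⟩
  by_cases hpc : p ∈ columns
  · rw [if_pos (hcond.mpr hpc), if_pos (by
      rw [PySem.Set.contains_iff]; exact (PySem.Set.mem_ofList columns p).mpr hpc)]
  · rw [if_neg (fun hcc => hpc (hcond.mp hcc))]
    rw [if_neg (show ¬(PySem.Set.contains (PySem.Set.ofList columns) p = true) from by
      rw [PySem.Set.contains_iff, PySem.Set.mem_ofList]; exact hpc)]
    set P : (String × Int) → Bool := fun t => PySem.Str.startswith t.1 p with hP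
    have final : ∀ (hi : Nat), hi ≤ pairs.length → lo ≤ hi →
        (∀ j (hj : j < pairs.length), P (pairs[j]) = true ↔ (lo ≤ j ∧ j < hi)) →
        ((PySem.List.sorted (PySem.List.slice pairs (some (lo : Int)) (some (hi : Int)))
          (fun t => t.2)).map (fun t => t.1))
        = columns.filter (fun c => PySem.Str.startswith c p) := by
      intro hi hhile hlohi hchar
      have hfilter : pairs.filter P = (pairs.drop lo).take (hi - lo) :=
        pv_filter_eq_slice pairs P lo hi hlohi hhile hchar
      rw [PySem.List.slice_natCast, ← hfilter]
      have hys : (E.filter P).Perm (pairs.filter P) := (hperm.filter P).symm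
      have hpw : (E.filter P).Pairwise (fun a b => a.2 < b.2) := by
        refine List.Pairwise.filter P ?_
        rw [hE, List.pairwise_map]
        refine (PySem.List.pairwise_lt_enumerate columns 0).imp ?_
        intro a b hab
        exact hab
      rw [PySem.List.sorted_eq_of_perm_of_pairwise_lt _ _ _ hys hpw]
      rw [show E.filter P = E.filter ((fun c => PySem.Str.startswith c p) ∘ (fun t : String × Int => t.1)) from rfl]
      rw [← List.filter_map, hfst]
    by_cases hnil : p.toList = []
    · rw [if_neg (by simpa using hnil)]
      refine final names.length (by omega) (by omega) ?_
      intro j hj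
      constructor
      · intro _
        refine ⟨?_, by omega⟩
        by_contra hcon
        have := blow j (by omega) (by omega)
        rw [String.lt_iff_toList_lt, hnil] at this
        exact List.not_lt_nil _ ((hnj j hj) ▸ this)
      · intro _
        rw [hP]
        simp only [PySem.Str.startswith_eq, hnil]
        rw [PySem.Chars.startswith_iff]
        exact List.nil_prefix
    · rw [if_pos (by simpa using hnil)]
      obtain ⟨q, a, hq⟩ := (List.eq_nil_or_concat p.toList).resolve_left hnil
      rw [List.concat_eq_append] at hq
      have ha : a.toNat + 1 < 55296 := by
        have hamem : a ∈ p.toList := by rw [hq]; simp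
        have := List.all_eq_true.mp hp a hamem
        unfold pvDomChar at this
        simp only [Bool.or_eq_true, Bool.and_eq_true, decide_eq_true_eq, beq_iff_eq] at this
        omega
      have hdl : p.toList.dropLast = q := by rw [hq]; exact List.dropLast_concat ..
      have hgl : p.toList.getLast! = a := by rw [hq]; simp
      rw [hdl, hgl]
      set a' := Char.ofNat (a.toNat + 1) with ha'
      set succ := String.ofList (q ++ [a']) with hsucc
      have hsuccl : succ.toList = q ++ [a'] := String.toList_ofList
      obtain ⟨clen, clow, cup⟩ := pvBisect_spec names succ hsorted
      set hi := PySem.List.bisectLeft names succ with hhi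
      have hpltsucc : p < succ := by
        rw [String.lt_iff_toList_lt, hsuccl]
        exact ((pv_prefix_interval q a ha p.toList).mpr (by rw [hq])).2
      have hlohi : lo ≤ hi := by
        by_contra hcon
        have hhilt : hi < names.length := by omega
        have h1 : names[hi] < p := blow hi hhilt (by omega)
        have h2 : succ ≤ names[hi] := cup hi hhilt le_rfl
        exact absurd (lt_of_le_of_lt h2 (lt_trans h1 hpltsucc)) (lt_irrefl _)
      refine final hi (by omega) hlohi ?_
      intro j hj
      have hj' : j < names.length := by omega
      rw [hP]
      simp only [← hnj j hj]
      rw [PySem.Str.startswith_eq, PySem.Chars.startswith_iff]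
      rw [hq, ← pv_prefix_interval q a ha]
      constructor
      · rintro ⟨h1, h2⟩
        constructor
        · by_contra hcon
          have := blow j hj' (by omega)
          rw [String.lt_iff_toList_lt, hq] at this
          exact absurd h1 (not_le_of_gt this)
        · by_contra hcon
          have := cup j hj' (by omega)
          rw [String.le_iff_toList_le, hsuccl] at this
          exact absurd h2 (not_lt_of_ge this)
      · rintro ⟨h1, h2⟩
        constructor
        · have := bup j hj' h1
          rw [String.le_iff_toList_le, hq] at this
          exact this
        · have := clow j hj' h2
          rw [String.lt_iff_toList_lt, hsuccl] at this
          exact this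

-- B's outer loop dedupes the chunks one prefix at a time
lemma pvB_fold (columns prefixes : List String) (hpref : prefixes.all pvDomStr = true)
    (st : PySem.Set String × List String) :
    prefixes.foldl (fun st p => pvDD st (pvCands columns p)) st
    = pvDD st (prefixes.flatMap (pvChunk columns)) := by
  induction prefixes generalizing st with
  | nil => simp [pvDD]
  | cons p t ih =>
    rw [List.all_cons, Bool.and_eq_true] at hpref
    simp only [List.foldl_cons, List.flatMap_cons, pvDD_append]
    rw [pvCands_eq_chunk columns p hpref.1, ih hpref.2]

-- ===== VERDICT (by name: the statement is the Claim_ definition above) =====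
theorem columns_matching_prefixes_spec : Claim_equal_columns_matching_prefixes := by
  intro columns prefixes hdom
  unfold Spec_columns_matching_prefixes
  unfold columns_matching_prefixes columns_matching_prefixes_alt
  simp only []
  rw [pvA_to_remove]
  have hpref : prefixes.all pvDomStr = true := by
    unfold Dom_columns_matching_prefixes at hdom
    rw [Bool.and_eq_true] at hdom
    simpa using hdom.2
  show (pvDD (PySem.Set.empty, []) (prefixes.flatMap (pvChunk columns))).2
     = (prefixes.foldl (fun st p => pvDD st (pvCands columns p)) (PySem.Set.empty, [])).2
  rw [pvB_fold columns prefixes hpref (PySem.Set.empty, [])]
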